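-- pv_equiv track=rewrite | github.com/jiudingsun01/InstructionEval | configs/processors/NIV2_tasks.py | niv2_1421_mathqa_general
-- ===== SOURCE A (Python) =====
-- def niv2_1421_mathqa_general(question, answer, options):
--     item_names = [chr(x) for x in range(ord("a"), ord("z") + 1)][:len(options)]
--     options_ = "Options:"
--     option_space_in_instruction = ""
--
--     for item, option in zip(item_names, options):
--         if item == item_names[-1]:
--             options_ += " {} ) {}".format(item, option)
--             option_space_in_instruction += "and '{}'.".format(item)
--         else:
--             options_ += " {} ) {} ,".format(item, option)
--             option_space_in_instruction += "'{}', ".format(item)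
--     answer = item_names[options.index(answer)]
--     definition_text = "In this task, you need to answer the given multiple-choice question on the general" \
--                       " math. Classify your answers into {}".format(option_space_in_instruction)
--     input_text = "Problem: {} \n{}".format(question, options_)
--     explanation = "\"explanation : 2 / 3 = . 66 , 3 / 4 = . 75 , 4 / 5 = . 8 and 5 / 3 = 1.66 so the biggest is" \
--                   " 5 / 3 and the smallest is 2 / 3 their difference is 5 / 3 - 2 / 3 = 3 / 3 = 1 option d\""
--     label_space = item_names
--     return definition_text, input_text, explanation, answer, label_space
-- ===== SOURCE B (Python) =====
-- ALPHA = "abcdefghijklmnopqrstuvwxyz"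
--
--
-- def _fragments(letters, opts):
--     # Recursive back-to-front assembly: the base case IS the last element,
--     # so no per-iteration "is this the last letter" comparison is needed.
--     l, o = letters[0], opts[0]
--     if len(letters) == 1:
--         return " {} ) {}".format(l, o), "and '{}'.".format(l)
--     rest_opts, rest_space = _fragments(letters[1:], opts[1:])
--     return " {} ) {} ,".format(l, o) + rest_opts, "'{}', ".format(l) + rest_space
--
--
-- def niv2_1421_mathqa_general(question, answer, options):
--     n = min(len(options), 26)
--     letters = list(ALPHA[:n])
--     answer = ALPHA[options.index(answer)]
--     if letters:
--         opts_tail, space = _fragments(letters, options[:n])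
--     else:
--         opts_tail, space = "", ""
--     definition_text = "In this task, you need to answer the given multiple-choice question on the general" \
--                       " math. Classify your answers into {}".format(space)
--     input_text = "Problem: {} \n{}".format(question, "Options:" + opts_tail)
--     explanation = "\"explanation : 2 / 3 = . 66 , 3 / 4 = . 75 , 4 / 5 = . 8 and 5 / 3 = 1.66 so the biggest is" \
--                   " 5 / 3 and the smallest is 2 / 3 their difference is 5 / 3 - 2 / 3 = 3 / 3 = 1 option d\""
--     return definition_text, input_text, explanation, answer, letters
-- ===== Notes on version B (the rewrite author's own statement) =====
-- stated objective: alternative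
-- what changed: Replaces A's single forward loop (which compares each letter against item_names[-1] on every iteration and appends to two accumulators) by a recursive back-to-front assembly over the letter/option lists whose base case is the last element, plus the answer letter taken from a constant alphabet string instead of the built letter list.
import Mathlib
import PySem

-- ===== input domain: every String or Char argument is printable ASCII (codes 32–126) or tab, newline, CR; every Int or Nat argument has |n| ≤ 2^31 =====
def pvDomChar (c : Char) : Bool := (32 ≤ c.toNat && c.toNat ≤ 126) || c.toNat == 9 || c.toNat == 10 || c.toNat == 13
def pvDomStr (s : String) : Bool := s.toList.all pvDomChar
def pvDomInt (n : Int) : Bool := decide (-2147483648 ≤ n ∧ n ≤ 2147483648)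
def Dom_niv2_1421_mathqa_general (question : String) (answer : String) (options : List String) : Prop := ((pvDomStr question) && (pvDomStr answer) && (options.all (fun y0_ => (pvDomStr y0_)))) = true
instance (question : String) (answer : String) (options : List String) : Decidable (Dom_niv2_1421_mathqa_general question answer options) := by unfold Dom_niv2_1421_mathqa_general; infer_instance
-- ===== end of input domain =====

-- B replaces A's forward loop with its per-iteration last-letter comparison by a recursive
-- back-to-front assembly whose base case is the last element (alternative decomposition, same cost).

def pvExplanation : String := "\"explanation : 2 / 3 = . 66 , 3 / 4 = . 75 , 4 / 5 = . 8 and 5 / 3 = 1.66 so the biggest is 5 / 3 and the smallest is 2 / 3 their difference is 5 / 3 - 2 / 3 = 3 / 3 = 1 option d\""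

def pvDefPrefix : String := "In this task, you need to answer the given multiple-choice question on the general math. Classify your answers into "

-- ===== PORT A =====
-- chr(x) on the code points 97..122 is exact as String.ofList [Char.ofNat x.toNat].
-- A's loop body reads item_names[-1]; inside the loop item_names is nonempty, so getLastD is exact there.
def pvStepA (last : String) (st : String × String) (p : String × String) : String × String :=
  if p.1 == last then
    (st.1 ++ (" " ++ p.1 ++ " ) " ++ p.2), st.2 ++ ("and '" ++ p.1 ++ "'."))
  else
    (st.1 ++ (" " ++ p.1 ++ " ) " ++ p.2 ++ " ,"), st.2 ++ ("'" ++ p.1 ++ "', "))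

-- item_names[options.index(answer)]: Python raises (ValueError/IndexError) when index? is none or
-- out of range; Pre_ excludes exactly those inputs, so the "" defaults are never reached under Pre_.
def niv2_1421_mathqa_general (question : String) (answer : String) (options : List String) : String × String × String × String × List String :=
  let item_names : List String :=
    PySem.List.slice ((PySem.List.pyRange 97 123 1).map (fun x => String.ofList [Char.ofNat x.toNat])) none (some (PySem.List.len options))
  let st := (item_names.zip options).foldl (pvStepA (item_names.getLastD "")) ("Options:", "")
  let answer2 : String :=
    match PySem.List.index? options answer with
    | some i => (PySem.List.pyGet? item_names (i : Int)).getD ""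
    | none => ""
  (pvDefPrefix ++ st.2, "Problem: " ++ question ++ " \n" ++ st.1, pvExplanation, answer2, item_names)

-- ===== PORT B =====
def pvAlphaS : String := "abcdefghijklmnopqrstuvwxyz"

-- _fragments in Source B: recursion on letters/opts; Python raises (IndexError) on the empty lists,
-- which the guarded call site never reaches — the ("", "") arm is that unreachable case.
def pvRecB : List String → List String → String × String
  | l :: ls, o :: _os =>
      if ls.isEmpty then
        (" " ++ l ++ " ) " ++ o, "and '" ++ l ++ "'.")
      else
        let r := pvRecB ls _os
        (" " ++ l ++ " ) " ++ o ++ " ," ++ r.1, "'" ++ l ++ "', " ++ r.2)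
  | _, _ => ("", "")

-- ALPHA[i] is a one-character string in Python: Str.pyGet? gives the Char, wrapped as a string;
-- list(ALPHA[:n]) likewise maps the sliced characters to one-character strings.
def niv2_1421_mathqa_general_alt (question : String) (answer : String) (options : List String) : String × String × String × String × List String :=
  let n : Nat := min options.length 26
  let letters : List String := (PySem.Str.slice pvAlphaS none (some (n : Int))).toList.map (fun c => String.ofList [c])
  let answer2 : String :=
    match PySem.List.index? options answer with
    | some i => ((PySem.Str.pyGet? pvAlphaS (i : Int)).map (fun c => String.ofList [c])).getD ""
    | none => ""
  let frag : String × String :=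
    if letters.isEmpty then ("", "")
    else pvRecB letters (PySem.List.slice options none (some (n : Int)))
  (pvDefPrefix ++ frag.2, "Problem: " ++ question ++ " \n" ++ ("Options:" ++ frag.1), pvExplanation, answer2, letters)

-- ===== PRECONDITION & SPEC =====
-- Pre_ excludes exactly the inputs where A raises: answer absent from options (ValueError from
-- options.index) or first occurring at index ≥ 26 (IndexError on item_names); B raises there too.
def Pre_niv2_1421_mathqa_general (question : String) (answer : String) (options : List String) : Prop :=
  answer ∈ options.take 26
instance (question : String) (answer : String) (options : List String) : Decidable (Pre_niv2_1421_mathqa_general question answer options) := by unfold Pre_niv2_1421_mathqa_general; infer_instance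

def pvWitness_niv2_1421_mathqa_general : String × String × List String := ("what is 1+1?", "2", ["2", "3"])

def Spec_niv2_1421_mathqa_general (question : String) (answer : String) (options : List String) (out : String × String × String × String × List String) : Prop := out = niv2_1421_mathqa_general_alt question answer options
instance (question : String) (answer : String) (options : List String) (out : String × String × String × String × List String) : Decidable (Spec_niv2_1421_mathqa_general question answer options out) := by unfold Spec_niv2_1421_mathqa_general; infer_instance

-- ===== CLAIM (what is proved, stated in full; the proofs are below) =====
def Claim_equal_niv2_1421_mathqa_general : Prop := ∀ (question : String) (answer : String) (options : List String), Dom_niv2_1421_mathqa_general question answer options → Pre_niv2_1421_mathqa_general question answer options → Spec_niv2_1421_mathqa_general question answer options (niv2_1421_mathqa_general question answer options)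

-- ===== LEMMAS AND PROOFS =====

-- the 26-letter list A slices from
def pvAlph : List String := (PySem.List.pyRange 97 123 1).map (fun x => String.ofList [Char.ofNat x.toNat])

lemma pvAlph_length : pvAlph.length = 26 := by decide
lemma pvAlph_nodup : pvAlph.Nodup := by decide

-- B's letter list equals A's item_names (27 bounded cases, closed by evaluation)
lemma lettersB_eq : ∀ n : Nat, n < 27 →
    (PySem.Str.slice pvAlphaS none (some (n : Int))).toList.map (fun c => String.ofList [c]) = pvAlph.take n := by
  decide

-- B's answer letter equals A's, for any in-range first index (bounded, closed by evaluation)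
lemma answerB_eq : ∀ n : Nat, n < 27 → ∀ i : Nat, i < n →
    ((PySem.Str.pyGet? pvAlphaS (i : Int)).map (fun c => String.ofList [c])).getD "" =
      (PySem.List.pyGet? (pvAlph.take n) (i : Int)).getD "" := by
  decide

lemma take_min26 (options : List String) :
    PySem.List.slice pvAlph none (some (PySem.List.len options)) = pvAlph.take (min options.length 26) := by
  rw [PySem.List.len_eq, PySem.List.slice_to_natCast, ← pvAlph_length, ← List.take_take,
    List.take_length]

-- pvRecB only reads the first |letters| options
lemma pvRecB_take : ∀ (L O : List String), pvRecB L (O.take L.length) = pvRecB L O := by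
  intro L
  induction L with
  | nil => intro O; cases O <;> rfl
  | cons l ls ih =>
    intro O
    cases O with
    | nil => rfl
    | cons o os =>
      simp only [List.length_cons, List.take_succ_cons, pvRecB, ih os]

-- A's fold over letters.zip O equals B's recursion, given the last-letter facts
lemma foldA_eq_recB (z : String) :
    ∀ (L O : List String) (s1 s2 : String), L ≠ [] → L.length ≤ O.length →
      L.getLast? = some z → (∀ l ∈ L.dropLast, l ≠ z) →
      (L.zip O).foldl (pvStepA z) (s1, s2) = (s1 ++ (pvRecB L O).1, s2 ++ (pvRecB L O).2) := by
  intro L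
  induction L with
  | nil => intro O s1 s2 h; exact absurd rfl h
  | cons l ls ih =>
    intro O s1 s2 _ hlen hlast hdrop
    cases O with
    | nil => simp at hlen
    | cons o os =>
      cases hls : ls with
      | nil =>
        subst hls
        have hz : l = z := by simpa using hlast
        subst hz
        simp only [List.zip_cons_cons, List.zip_nil_left, List.foldl_cons, List.foldl_nil,
          pvStepA, beq_self_eq_true, if_pos, pvRecB, List.isEmpty_nil]
      | cons l2 ls2 =>
        subst hls
        have hlne : l ≠ z := hdrop l (by simp)
        have hbeq : (l == z) = false := beq_eq_false_iff_ne.mpr hlne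
        have hlast' : (l2 :: ls2).getLast? = some z := by
          rw [← hlast]; simp [List.getLast?_cons_cons]
        have hdrop' : ∀ x ∈ (l2 :: ls2).dropLast, x ≠ z := by
          intro x hx
          exact hdrop x (by simp [List.dropLast_cons_of_ne_nil, hx])
        have hrec := ih (O := os) (s1 ++ (" " ++ l ++ " ) " ++ o ++ " ,"))
          (s2 ++ ("'" ++ l ++ "', ")) (by simp) (by simpa using hlen) hlast' hdrop'
        simp only [List.zip_cons_cons, List.foldl_cons, pvStepA, hbeq, Bool.false_eq_true,
          if_false, hrec, pvRecB, List.isEmpty_cons, if_false]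
        refine Prod.ext ?_ ?_ <;> apply String.toList_inj.mp <;> simp
-- ===== VERDICT (by name: the statement is the Claim_ definition above) =====
theorem niv2_1421_mathqa_general_spec : Claim_equal_niv2_1421_mathqa_general := by
  intro question answer options _ hPre
  unfold Spec_niv2_1421_mathqa_general
  have hO : options ≠ [] := by
    intro h; subst h; simp [Pre_niv2_1421_mathqa_general] at hPre
  have hn0 : 0 < options.length := List.length_pos_of_ne_nil hO
  set n : Nat := min options.length 26 with hn
  set L : List String := pvAlph.take n with hLdef
  have hlenL : L.length = n := by
    rw [hLdef, List.length_take, pvAlph_length]; omega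
  have hLne : L ≠ [] := by
    intro h; rw [h] at hlenL; simp at hlenL; omega
  have hnodup : L.Nodup := (List.take_sublist n pvAlph).nodup pvAlph_nodup
  have hlast : L.getLast? = some (L.getLastD "") := by
    rw [List.getLastD_eq_getLast?, List.getLast?_eq_some_getLast hLne]; rfl
  have hdrop : ∀ x ∈ L.dropLast, x ≠ L.getLastD "" := by
    intro x hx heq
    have h1 : L.dropLast ++ [L.getLast hLne] = L := List.dropLast_append_getLast hLne
    have hz : L.getLastD "" = L.getLast hLne := by
      rw [List.getLastD_eq_getLast?, List.getLast?_eq_some_getLast hLne]; rfl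
    rw [← h1] at hnodup
    exact (List.disjoint_of_nodup_append hnodup) (by rw [← hz, ← heq]; exact hx)
      (List.mem_singleton.mpr rfl)
  have hfoldr := foldA_eq_recB (L.getLastD "") L options "Options:" "" hLne
    (by rw [hlenL]; omega) hlast hdrop
  have hslice : PySem.List.slice options none (some (n : Int)) = options.take n :=
    PySem.List.slice_to_natCast options n
  have hrecEq : pvRecB L (options.take n) = pvRecB L options := by
    rw [← hlenL]; exact pvRecB_take L options
  have hfold : (PySem.List.pyRange 97 123 1).map (fun x => String.ofList [Char.ofNat x.toNat]) = pvAlph := rfl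
  have hEmp : L.isEmpty = false := by simp [hLne]
  simp only [niv2_1421_mathqa_general, niv2_1421_mathqa_general_alt, hfold, take_min26, ← hn,
    lettersB_eq n (by omega), ← hLdef, hfoldr, hslice, hrecEq, hEmp, Bool.false_eq_true,
    if_false]
  refine Prod.ext ?_ (Prod.ext ?_ (Prod.ext rfl (Prod.ext ?_ rfl)))
  · apply String.toList_inj.mp; simp
  · rfl
  · cases hidx : PySem.List.index? options answer with
    | none => rfl
    | some i =>
      obtain ⟨hi, hival, hifirst⟩ := PySem.List.getElem_of_index?_eq_some hidx
      have hi26 : i < 26 := by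
        by_contra h
        obtain ⟨j, hj, hjval⟩ := List.mem_take_iff_getElem.mp hPre
        exact hifirst j (by omega) hjval
      exact (answerB_eq n (by omega) i (by omega)).symm
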